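-- pv_equiv track=rewrite | github.com/BeneKenobi/quarto-template | render_single.py | comment_sidebar
-- ===== SOURCE A (Python) =====
-- def comment_sidebar(lines: list[str]) -> list[str]:
--     commented_lines = []
--     in_sidebar = False
--     sidebar_indent = 0
--
--     for line in lines:
--         stripped_line = line.lstrip()
--         if stripped_line.startswith("sidebar:"):
--             in_sidebar = True
--             sidebar_indent = len(line) - len(stripped_line)
--             commented_lines.append(f"# {line}")
--         elif in_sidebar:
--             current_indent = len(line) - len(stripped_line)
--             if current_indent > sidebar_indent:
--                 commented_lines.append(f"# {line}")
--             else: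
--                 in_sidebar = False
--                 commented_lines.append(line)
--         else:
--             commented_lines.append(line)
--
--     return commented_lines
-- ===== SOURCE B (Python) =====
-- def comment_sidebar(lines: list[str]) -> list[str]:
--     # Recursive block decomposition: find the first "sidebar:" header, measure its
--     # indented block, comment the whole slice at once, then recurse on the remainder.
--     for i, line in enumerate(lines):
--         stripped = line.lstrip()
--         if stripped.startswith("sidebar:"):
--             d = len(line) - len(stripped)
--             k = i + 1
--             while k < len(lines):
--                 s = lines[k].lstrip()
--                 if s.startswith("sidebar:") or len(lines[k]) - len(s) <= d:
--                     break
--                 k += 1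
--             return lines[:i] + [f"# {l}" for l in lines[i:k]] + comment_sidebar(lines[k:])
--     return list(lines)
-- ===== Notes on version B (the rewrite author's own statement) =====
-- stated objective: alternative
-- what changed: B drops A's in_sidebar/indent state machine entirely: it recursively finds the first 'sidebar:' header, measures the extent of its indented block with an inner scan, comments the whole slice at once with list slicing, and recurses on the remainder.
import Mathlib
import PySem

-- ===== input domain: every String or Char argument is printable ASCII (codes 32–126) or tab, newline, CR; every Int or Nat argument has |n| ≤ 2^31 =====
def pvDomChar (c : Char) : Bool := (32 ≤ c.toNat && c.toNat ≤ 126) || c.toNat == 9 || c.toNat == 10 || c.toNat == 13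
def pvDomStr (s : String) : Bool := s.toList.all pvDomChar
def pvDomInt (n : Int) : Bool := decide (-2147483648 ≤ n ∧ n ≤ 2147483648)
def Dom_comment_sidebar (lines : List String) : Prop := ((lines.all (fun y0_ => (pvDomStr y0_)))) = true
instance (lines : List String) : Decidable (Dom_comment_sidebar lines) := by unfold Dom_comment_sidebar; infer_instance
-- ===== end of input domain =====

-- B replaces A's in_sidebar state machine by a recursive block decomposition
-- (find first header, comment its whole block by slicing, recurse); equal return
-- value everywhere, no speed claim.

-- ===== PORT A =====
-- single pass: accumulator of output lines + (in_sidebar, sidebar_indent) state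
def comment_sidebar (lines : List String) : List String :=
  (lines.foldl
    (fun (p : List String × Bool × Int) line =>
      let stripped := PySem.Str.lstrip line
      if PySem.Str.startswith stripped "sidebar:" then
        (p.1 ++ ["# " ++ line], true, PySem.Str.len line - PySem.Str.len stripped)
      else if p.2.1 then
        let current_indent := PySem.Str.len line - PySem.Str.len stripped
        if current_indent > p.2.2 then
          (p.1 ++ ["# " ++ line], p.2.1, p.2.2)
        else
          (p.1 ++ [line], false, p.2.2)
      else
        (p.1 ++ [line], p.2.1, p.2.2))
    ([], false, 0)).1

-- ===== PORT B =====
-- Source B's `for i, line in enumerate(lines): if header -> return …` : first header index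
def csFirstHeader : List String → Option Nat
  | [] => none
  | line :: rest =>
    if PySem.Str.startswith (PySem.Str.lstrip line) "sidebar:" then some 0
    else (csFirstHeader rest).map (· + 1)

-- Source B's inner `while k < len(lines): … break` over lines[i+1:], as the number of
-- lines scanned before the break (loop over the suffix = loop over indices k)
def csBlockLen (d : Int) : List String → Nat
  | [] => 0
  | line :: rest =>
    let s := PySem.Str.lstrip line
    if PySem.Str.startswith s "sidebar:" || PySem.Str.len line - PySem.Str.len s ≤ d then 0
    else 1 + csBlockLen d rest

-- slices lines[:i], lines[i:k], lines[k:] with 0 ≤ i ≤ k ≤ len are exactly take/drop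
def comment_sidebar_alt (lines : List String) : List String :=
  match hh : csFirstHeader lines with
  | none => lines
  | some i =>
    let line := lines.getD i ""
    let stripped := PySem.Str.lstrip line
    let d := PySem.Str.len line - PySem.Str.len stripped
    let k := i + 1 + csBlockLen d (lines.drop (i + 1))
    lines.take i ++ ((lines.drop i).take (k - i)).map (fun l => "# " ++ l)
      ++ comment_sidebar_alt (lines.drop k)
termination_by lines.length
decreasing_by
  cases lines with
  | nil => simp [csFirstHeader] at hh
  | cons a r => simp; omega

-- ===== PRECONDITION & SPEC =====
def Spec_comment_sidebar (lines : List String) (out : List String) : Prop := out = comment_sidebar_alt lines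
instance (lines : List String) (out : List String) : Decidable (Spec_comment_sidebar lines out) := by unfold Spec_comment_sidebar; infer_instance

-- ===== CLAIM (what is proved, stated in full; the proofs are below) =====
def Claim_equal_comment_sidebar : Prop := ∀ (lines : List String), Dom_comment_sidebar lines → Spec_comment_sidebar lines (comment_sidebar lines)

-- ===== LEMMAS AND PROOFS =====

-- reference: A's state machine as direct structural recursion
def csSpec : Bool → Int → List String → List String
  | _, _, [] => []
  | b, ind, line :: rest =>
    let stripped := PySem.Str.lstrip line
    if PySem.Str.startswith stripped "sidebar:" then
      ("# " ++ line) :: csSpec true (PySem.Str.len line - PySem.Str.len stripped) rest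
    else if b then
      if PySem.Str.len line - PySem.Str.len stripped > ind then
        ("# " ++ line) :: csSpec b ind rest
      else
        line :: csSpec false ind rest
    else
      line :: csSpec b ind rest

theorem foldlA_eq (lines : List String) (b : Bool) (ind : Int) (acc : List String) :
    (lines.foldl
      (fun (p : List String × Bool × Int) line =>
        let stripped := PySem.Str.lstrip line
        if PySem.Str.startswith stripped "sidebar:" then
          (p.1 ++ ["# " ++ line], true, PySem.Str.len line - PySem.Str.len stripped)
        else if p.2.1 then
          let current_indent := PySem.Str.len line - PySem.Str.len stripped
          if current_indent > p.2.2 then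
            (p.1 ++ ["# " ++ line], p.2.1, p.2.2)
          else
            (p.1 ++ [line], false, p.2.2)
        else
          (p.1 ++ [line], p.2.1, p.2.2))
      (acc, b, ind)).1 = acc ++ csSpec b ind lines := by
  induction lines generalizing b ind acc with
  | nil => simp [csSpec]
  | cons line rest ih =>
    simp only [List.foldl, csSpec]
    split_ifs with h1 h2 h3 <;> rw [ih] <;> simp

theorem fh_lt {lines : List String} {i : Nat} (h : csFirstHeader lines = some i) :
    i < lines.length := by
  induction lines generalizing i with
  | nil => simp [csFirstHeader] at h
  | cons a r ih =>
    simp only [csFirstHeader] at h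
    split_ifs at h with h1
    · simp only [Option.some.injEq] at h
      simp only [List.length_cons]; omega
    · cases hr : csFirstHeader r with
      | none => rw [hr] at h; simp at h
      | some j =>
        rw [hr] at h
        simp only [Option.map_some, Option.some.injEq] at h
        have := ih hr
        simp only [List.length_cons]; omega

theorem fh_take {lines : List String} {i : Nat} (h : csFirstHeader lines = some i) :
    ∀ l ∈ lines.take i, PySem.Str.startswith (PySem.Str.lstrip l) "sidebar:" = false := by
  induction lines generalizing i with
  | nil => simp
  | cons a r ih =>
    simp only [csFirstHeader] at h
    split_ifs at h with h1
    · simp only [Option.some.injEq] at h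
      subst h; simp
    · cases hr : csFirstHeader r with
      | none => rw [hr] at h; simp at h
      | some j =>
        rw [hr] at h
        simp only [Option.map_some, Option.some.injEq] at h
        subst h
        intro l hl
        rw [List.take_succ_cons] at hl
        rcases List.mem_cons.mp hl with rfl | hl'
        · exact Bool.eq_false_iff.mpr h1
        · exact ih hr l hl'

theorem fh_get {lines : List String} {i : Nat} (h : csFirstHeader lines = some i) :
    PySem.Str.startswith (PySem.Str.lstrip (lines.getD i "")) "sidebar:" = true := by
  induction lines generalizing i with
  | nil => simp [csFirstHeader] at h
  | cons a r ih =>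
    simp only [csFirstHeader] at h
    split_ifs at h with h1
    · simp only [Option.some.injEq] at h
      subst h; exact h1
    · cases hr : csFirstHeader r with
      | none => rw [hr] at h; simp at h
      | some j =>
        rw [hr] at h
        simp only [Option.map_some, Option.some.injEq] at h
        subst h
        exact ih hr

theorem fh_none : ∀ {lines : List String}, csFirstHeader lines = none →
    ∀ l ∈ lines, PySem.Str.startswith (PySem.Str.lstrip l) "sidebar:" = false := by
  intro lines
  induction lines with
  | nil => intro _ l hl; simp at hl
  | cons a r ih =>
    intro h l hl
    simp only [csFirstHeader] at h
    by_cases h1 : PySem.Str.startswith (PySem.Str.lstrip a) "sidebar:" = true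
    · rw [if_pos h1] at h; exact absurd h (by simp)
    · rw [if_neg h1] at h
      have hr : csFirstHeader r = none := by
        cases hr : csFirstHeader r with
        | none => rfl
        | some j => rw [hr] at h; simp at h
      rcases List.mem_cons.mp hl with rfl | hl'
      · exact Bool.eq_false_iff.mpr h1
      · exact ih hr l hl'

theorem spec_false_irrel (lines : List String) (a b : Int) :
    csSpec false a lines = csSpec false b lines := by
  induction lines generalizing a b with
  | nil => rfl
  | cons l r ih =>
    simp only [csSpec]
    by_cases h1 : PySem.Str.startswith (PySem.Str.lstrip l) "sidebar:" = true
    · rw [if_pos h1, if_pos h1]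
    · rw [if_neg h1, if_neg h1, if_neg Bool.false_ne_true, if_neg Bool.false_ne_true, ih a b]

theorem spec_false_append (pre rest : List String) (a : Int)
    (h : ∀ l ∈ pre, PySem.Str.startswith (PySem.Str.lstrip l) "sidebar:" = false) :
    csSpec false a (pre ++ rest) = pre ++ csSpec false a rest := by
  induction pre with
  | nil => simp
  | cons p q ih =>
    have hp := h p (List.mem_cons_self ..)
    simp only [List.cons_append, csSpec]
    rw [if_neg (by rw [hp]; exact Bool.false_ne_true), if_neg Bool.false_ne_true]
    rw [ih (fun l hl => h l (List.mem_cons_of_mem _ hl))]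

theorem spec_false_nohdr (lines : List String) (a : Int)
    (h : ∀ l ∈ lines, PySem.Str.startswith (PySem.Str.lstrip l) "sidebar:" = false) :
    csSpec false a lines = lines := by
  have := spec_false_append lines [] a h
  simp only [List.append_nil] at this
  rw [this]
  simp only [show csSpec false a [] = ([] : List String) from rfl, List.append_nil]

theorem spec_true_block (d : Int) (rest : List String) :
    csSpec true d rest =
      ((rest.take (csBlockLen d rest)).map (fun l => "# " ++ l))
        ++ csSpec false 0 (rest.drop (csBlockLen d rest)) := by
  induction rest with
  | nil => rfl
  | cons l r ih =>
    by_cases h1 : PySem.Str.startswith (PySem.Str.lstrip l) "sidebar:" = true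
    · have hb : csBlockLen d (l :: r) = 0 := by
        simp only [csBlockLen]
        rw [if_pos (by rw [h1]; rfl)]
      rw [hb]
      simp only [List.take_zero, List.map_nil, List.nil_append, List.drop_zero]
      simp only [csSpec]
      rw [if_pos h1, if_pos h1]
    · by_cases h2 : PySem.Str.len l - PySem.Str.len (PySem.Str.lstrip l) > d
      · have hb : csBlockLen d (l :: r) = 1 + csBlockLen d r := by
          simp only [csBlockLen]
          rw [if_neg (by
            simp only [Bool.or_eq_true, decide_eq_true_eq, not_or]
            exact ⟨h1, by omega⟩)]
      -- block continues with l
        rw [hb, Nat.add_comm 1 (csBlockLen d r)]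
        rw [List.take_succ_cons, List.drop_succ_cons]
        simp only [List.map_cons, List.cons_append]
        simp only [csSpec]
        rw [if_neg h1, if_pos trivial, if_pos h2, ih]
      · have hb : csBlockLen d (l :: r) = 0 := by
          simp only [csBlockLen]
          rw [if_pos (by
            simp only [Bool.or_eq_true, decide_eq_true_eq]
            right; omega)]
        rw [hb]
        simp only [List.take_zero, List.map_nil, List.nil_append, List.drop_zero]
        simp only [csSpec]
        rw [if_neg h1, if_neg h1, if_pos trivial, if_neg h2, if_neg Bool.false_ne_true,
          spec_false_irrel r d 0]

theorem alt_eq_spec : ∀ (lines : List String), comment_sidebar_alt lines = csSpec false 0 lines := by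
  intro lines
  induction hn : lines.length using Nat.strong_induction_on generalizing lines with
  | _ n ih =>
  subst hn
  cases hh : csFirstHeader lines with
  | none =>
    rw [comment_sidebar_alt.eq_def]
    rw [hh]
    exact (spec_false_nohdr lines 0 (fh_none hh)).symm
  | some i =>
    have hi : i < lines.length := fh_lt hh
    have hne : 0 < lines.length := by omega
    rw [comment_sidebar_alt.eq_def, hh]
    simp only []
    have hdropi : lines.drop i = lines.getD i "" :: lines.drop (i + 1) := by
      rw [List.getD_eq_getElem _ _ hi]
      exact List.drop_eq_getElem_cons hi
    have hrec := ih (lines.drop (i + 1 + csBlockLen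
        (PySem.Str.len (lines.getD i "") - PySem.Str.len (PySem.Str.lstrip (lines.getD i "")))
        (lines.drop (i + 1)))).length
      (by simp only [List.length_drop]; omega)
      _ rfl
    rw [hrec]
    have hksub : i + 1 + csBlockLen
        (PySem.Str.len (lines.getD i "") - PySem.Str.len (PySem.Str.lstrip (lines.getD i "")))
        (lines.drop (i + 1)) - i
        = csBlockLen
        (PySem.Str.len (lines.getD i "") - PySem.Str.len (PySem.Str.lstrip (lines.getD i "")))
        (lines.drop (i + 1)) + 1 := by omega
    rw [hksub]
    conv_rhs => rw [← List.take_append_drop i lines]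
    rw [spec_false_append _ _ 0 (fh_take hh), hdropi]
    simp only [csSpec]
    rw [if_pos (fh_get hh)]
    rw [spec_true_block]
    rw [List.take_succ_cons, List.map_cons]
    have hdrop2 : lines.drop (i + 1 + csBlockLen
        (PySem.Str.len (lines.getD i "") - PySem.Str.len (PySem.Str.lstrip (lines.getD i "")))
        (lines.drop (i + 1)))
        = (lines.drop (i + 1)).drop (csBlockLen
        (PySem.Str.len (lines.getD i "") - PySem.Str.len (PySem.Str.lstrip (lines.getD i "")))
        (lines.drop (i + 1))) := by
      rw [List.drop_drop]
    rw [hdrop2]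
    simp

-- ===== VERDICT (by name: the statement is the Claim_ definition above) =====
theorem comment_sidebar_spec : Claim_equal_comment_sidebar := by
  intro lines _
  unfold Spec_comment_sidebar
  rw [alt_eq_spec]
  unfold comment_sidebar
  rw [foldlA_eq]
  simp
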